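-- pv_equiv track=rewrite | github.com/avassdal/napalm_netgear | napalm_netgear/parser.py | parse_fixed_width_table
-- ===== SOURCE A (Python) =====
-- from typing import Dict, List, Optional, Union, Any
--
-- def parse_fixed_width_table(fields: List[str], data: List[str]) -> List[Dict[str, str]]:
--     """Parse fixed-width table output from Netgear switches.
--
--     Args:
--         fields: List of field names corresponding to table columns
--         data: Raw command output lines
--
--     Returns:
--         List of dictionaries with field names as keys and values from table
--
--     Example:
--         >>> data = [
--         ...     "Port       Name         State",
--         ...     "---------- ------------ -----",
--         ...     "0/1                     Up   ",
--         ...     "0/2        Server1      Down "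
--         ... ]
--         >>> fields = ["port", "name", "state"]
--         >>> parse_fixed_width_table(fields, data)
--         [
--             {"port": "0/1", "name": "", "state": "Up"},
--             {"port": "0/2", "name": "Server1", "state": "Down"}
--         ]
--     """
--     cell_start = []  # Start positions of columns
--     cell_end = []    # End positions of columns
--     results = []
--
--     for line in data:
--         # Parse separator line to find column boundaries
--         if line.startswith("-"):
--             if cell_start:  # Already found boundaries
--                 break
--
--             in_cell = False
--             for i, char in enumerate(line):
--                 if char == "-" and not in_cell:
--                     cell_start.append(i)
--                     in_cell = True
--                 elif char == " " and in_cell: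
--                     cell_end.append(i)
--                     in_cell = False
--
--             if in_cell:  # Handle last column
--                 cell_end.append(len(line))
--             continue
--
--         if not cell_start:  # Skip until we find column boundaries
--             continue
--
--         # Parse data line into fields
--         item = {}
--         for i, field in enumerate(fields):
--             if not field:  # Skip empty field names
--                 continue
--             item[field] = line[cell_start[i]:cell_end[i]].strip()
--         results.append(item)
--
--     return results
-- ===== SOURCE B (Python) =====
-- from typing import Dict, List
--
-- def parse_fixed_width_table(fields: List[str], data: List[str]) -> List[Dict[str, str]]:
--     """Tokenize the separator line with split(" ") and derive each column span
--     from the token's offset; then build the rows by dict comprehension."""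
--     for sep_at, line in enumerate(data):
--         if line.startswith("-"):
--             break
--     else:
--         return []
--
--     # Column spans: each space-delimited token of the separator line that
--     # contains a dash yields one column, from its first dash to the token end.
--     spans, pos = [], 0
--     for tok in data[sep_at].split(" "):
--         if "-" in tok:
--             spans.append((pos + tok.index("-"), pos + len(tok)))
--         pos += len(tok) + 1
--
--     body = []
--     for row in data[sep_at + 1:]:
--         if row.startswith("-"):
--             break
--         body.append(row)
--
--     named = [(i, f) for i, f in enumerate(fields) if f]
--     return [{f: row[spans[i][0]:spans[i][1]].strip() for i, f in named} for row in body]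
-- ===== Notes on version B (the rewrite author's own statement) =====
-- stated objective: alternative
-- what changed: Column spans are derived by tokenizing the separator line with str.split(' ') (offset arithmetic plus first-dash index per token) instead of A's per-character in_cell state machine, and rows are built by a dict comprehension over a precomputed (index, name) list instead of A's single-pass loop with skip/break flags.
import Mathlib
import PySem

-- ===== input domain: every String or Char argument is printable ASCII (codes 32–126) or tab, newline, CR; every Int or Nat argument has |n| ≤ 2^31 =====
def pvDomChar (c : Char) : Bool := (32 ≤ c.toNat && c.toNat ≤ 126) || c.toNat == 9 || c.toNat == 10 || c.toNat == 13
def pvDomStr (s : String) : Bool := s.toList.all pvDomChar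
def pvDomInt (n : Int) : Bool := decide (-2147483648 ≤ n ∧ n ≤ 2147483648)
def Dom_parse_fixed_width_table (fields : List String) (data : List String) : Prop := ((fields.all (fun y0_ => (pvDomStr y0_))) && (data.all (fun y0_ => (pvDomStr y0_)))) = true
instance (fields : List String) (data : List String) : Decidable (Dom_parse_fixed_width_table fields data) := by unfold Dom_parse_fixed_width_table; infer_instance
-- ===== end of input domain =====

-- B replaces A's per-character in_cell state machine by tokenizing the separator line with
-- split(" ") and deriving each column span from the token offsets, and A's single accumulating
-- loop by a dict-comprehension row phase; objective: alternative, same asymptotic cost.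

-- ===== PORT A =====

-- A's inner separator scan: 'for i, char in enumerate(line)' with cell_start/cell_end/in_cell.
def pfwSep : List Char → Nat → List Nat → List Nat → Bool → List Nat × List Nat × Bool
  | [], _, cs, ce, inc => (cs, ce, inc)
  | c :: rest, i, cs, ce, inc =>
    if c = '-' ∧ inc = false then pfwSep rest (i+1) (cs ++ [i]) ce true
    else if c = ' ' ∧ inc = true then pfwSep rest (i+1) cs (ce ++ [i]) false
    else pfwSep rest (i+1) cs ce inc

-- A's inner row loop; 'cell_start[i]' raises IndexError in Python when out of range — the total
-- pyGetD default 0 is only reached outside Pre_parse_fixed_width_table.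
def pfwRowA (fields : List String) (line : String) (cs ce : List Nat) : PySem.Dict String String :=
  (PySem.List.enumerate fields 0).foldl (fun item p =>
    if p.2 = "" then item
    else item.insert p.2 (PySem.Str.strip (PySem.Str.slice line
      (some ((PySem.List.pyGetD cs p.1 0 : Nat) : Int))
      (some ((PySem.List.pyGetD ce p.1 0 : Nat) : Int))))) PySem.Dict.empty

-- A's main 'for line in data' loop, with break rendered by returning the accumulator.
def pfwMainA (fields : List String) : List String → List Nat → List Nat → List (List (String × String)) → List (List (String × String))
  | [], _, _, results => results
  | line :: rest, cs, ce, results =>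
    if PySem.Str.startswith line "-" then
      if cs ≠ [] then results
      else
        match pfwSep line.toList 0 [] [] false with
        | (cs', ce', inc) =>
          pfwMainA fields rest cs' (if inc then ce' ++ [line.toList.length] else ce') results
    else if cs = [] then pfwMainA fields rest cs ce results
    else pfwMainA fields rest cs ce (results ++ [(pfwRowA fields line cs ce).items])

def parse_fixed_width_table (fields : List String) (data : List String) : List (List (String × String)) :=
  pfwMainA fields data [] [] []

-- ===== PORT B =====

-- B's 'for sep_at, line in enumerate(data): if line.startswith("-"): break / else return []',
-- returning the separator line together with the lines after it (data[sep_at:], split off).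
def pfwFindHeader : List String → Option (String × List String)
  | [] => none
  | l :: rest => if PySem.Str.startswith l "-" then some (l, rest) else pfwFindHeader rest

-- hand port of str.split(" ") over the character list (exact: single-character separator,
-- Python keeps empty pieces between adjacent separators and at both ends).
def pfwSplit : List Char → List (List Char)
  | [] => [[]]
  | c :: rest =>
    if c = ' ' then [] :: pfwSplit rest
    else
      match pfwSplit rest with
      | t :: ts => (c :: t) :: ts
      | [] => [[c]]

-- B's span loop over the tokens: '"-" in tok' is tok.contains, and tok.index("-") — guarded by
-- the membership test — is the index of the first '-' (exact hand port for a one-char needle).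
def pfwSpansB : List (List Char) → Nat → List (Nat × Nat)
  | [], _ => []
  | t :: ts, pos =>
    if t.contains '-' then
      (pos + t.findIdx (· == '-'), pos + t.length) :: pfwSpansB ts (pos + t.length + 1)
    else pfwSpansB ts (pos + t.length + 1)

-- B's body loop: rows after the separator, up to the next separator line.
def pfwBody : List String → List String
  | [] => []
  | row :: rest => if PySem.Str.startswith row "-" then [] else row :: pfwBody rest

-- B's 'named = [(i, f) for i, f in enumerate(fields) if f]'.
def pfwNamed (fields : List String) : List (Int × String) :=
  (PySem.List.enumerate fields 0).filter (fun p => p.2 != "")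

-- B's dict comprehension for one row; 'spans[i]' raises IndexError in Python when out of range —
-- the total pyGetD default (0, 0) is only reached outside Pre_parse_fixed_width_table.
def pfwRowB (named : List (Int × String)) (line : String) (sp : List (Nat × Nat)) : PySem.Dict String String :=
  named.foldl (fun item p =>
    item.insert p.2 (PySem.Str.strip (PySem.Str.slice line
      (some (((PySem.List.pyGetD sp p.1 (0, 0)).1 : Nat) : Int))
      (some (((PySem.List.pyGetD sp p.1 (0, 0)).2 : Nat) : Int))))) PySem.Dict.empty

def parse_fixed_width_table_alt (fields : List String) (data : List String) : List (List (String × String)) :=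
  match pfwFindHeader data with
  | none => []
  | some (sep, rest) =>
    (pfwBody rest).map (fun row =>
      (pfwRowB (pfwNamed fields) row (pfwSpansB (pfwSplit sep.toList) 0)).items)

-- ===== PRECONDITION & SPEC =====

-- i is the start of a column of separator line l: a '-' with every earlier '-' closed by a space.
def pvColStart (l : List Char) (i : Nat) : Bool :=
  (l[i]? == some '-') && decide (∀ j < i, l[j]? = some '-' → ∃ k < i, j < k ∧ l[k]? = some ' ')

def pvNumCols (l : List Char) : Nat := ((List.range l.length).filter (pvColStart l)).length

-- Pre_ excludes exactly the inputs where Python A raises IndexError: a separator line was found,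
-- at least one data row follows it, and some non-empty field name has an index ≥ the number of
-- columns of the separator line (B raises the same IndexError there).
def Pre_parse_fixed_width_table (fields : List String) (data : List String) : Prop :=
  ((List.range data.length).all (fun h =>
    !(PySem.Str.startswith (data.getD h "") "-"
       && (List.range h).all (fun j => !PySem.Str.startswith (data.getD j "") "-")
       && decide (h + 1 < data.length) && !PySem.Str.startswith (data.getD (h + 1) "") "-")
    || (List.range fields.length).all (fun i =>
         fields.getD i "" == "" || decide (i < pvNumCols (data.getD h "").toList)))) = true

instance (fields : List String) (data : List String) : Decidable (Pre_parse_fixed_width_table fields data) := by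
  unfold Pre_parse_fixed_width_table; infer_instance

def pvWitness_parse_fixed_width_table : List String × List String :=
  (["port", "state"], ["Port State", "----- -----", "0/1   Up   "])

def Spec_parse_fixed_width_table (fields : List String) (data : List String) (out : List (List (String × String))) : Prop := out = parse_fixed_width_table_alt fields data
instance (fields : List String) (data : List String) (out : List (List (String × String))) : Decidable (Spec_parse_fixed_width_table fields data out) := by unfold Spec_parse_fixed_width_table; infer_instance

-- ===== CLAIM (what is proved, stated in full; the proofs are below) =====
def Claim_equal_parse_fixed_width_table : Prop := ∀ (fields : List String) (data : List String), Dom_parse_fixed_width_table fields data → Pre_parse_fixed_width_table fields data → Spec_parse_fixed_width_table fields data (parse_fixed_width_table fields data)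

-- ===== LEMMAS AND PROOFS =====

-- reference description of the columns of a separator line, used to relate pfwSep and pfwSpansB
mutual
def refEnd : List Char → Nat → Nat × List (Nat × Nat)
  | [], i => (i, [])
  | c :: rest, i => if c = ' ' then (i, refSpans rest (i+1)) else refEnd rest (i+1)
def refSpans : List Char → Nat → List (Nat × Nat)
  | [], _ => []
  | c :: rest, i =>
    if c = '-' then (i, (refEnd rest (i+1)).1) :: (refEnd rest (i+1)).2
    else refSpans rest (i+1)
end

def pfwFix (n : Nat) (st : List Nat × List Nat × Bool) : List Nat × List Nat :=
  (st.1, if st.2.2 then st.2.1 ++ [n] else st.2.1)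

theorem pfwSep_ref (l : List Char) : ∀ (i : Nat) (cs ce : List Nat),
    pfwFix (i + l.length) (pfwSep l i cs ce false)
      = (cs ++ (refSpans l i).map Prod.fst, ce ++ (refSpans l i).map Prod.snd)
    ∧ pfwFix (i + l.length) (pfwSep l i cs ce true)
      = (cs ++ (refEnd l i).2.map Prod.fst, ce ++ ((refEnd l i).1 :: (refEnd l i).2.map Prod.snd)) := by
  induction l with
  | nil => intro i cs ce; constructor <;> simp [pfwSep, pfwFix, refSpans, refEnd]
  | cons c rest ih =>
    intro i cs ce
    constructor
    · by_cases hc : c = '-'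
      · subst hc
        rw [show pfwSep ('-' :: rest) i cs ce false = pfwSep rest (i+1) (cs ++ [i]) ce true by
          simp [pfwSep]]
        rw [show i + ('-' :: rest).length = (i+1) + rest.length by simp; omega]
        rw [(ih (i+1) (cs ++ [i]) ce).2]
        simp [refSpans]
      · rw [show pfwSep (c :: rest) i cs ce false = pfwSep rest (i+1) cs ce false by
          simp [pfwSep, hc]]
        rw [show i + (c :: rest).length = (i+1) + rest.length by simp; omega]
        rw [(ih (i+1) cs ce).1]
        simp [refSpans, hc]
    · by_cases hc : c = ' '
      · subst hc
        rw [show pfwSep (' ' :: rest) i cs ce true = pfwSep rest (i+1) cs (ce ++ [i]) false by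
          simp [pfwSep]]
        rw [show i + (' ' :: rest).length = (i+1) + rest.length by simp; omega]
        rw [(ih (i+1) cs (ce ++ [i])).1]
        simp [refEnd]
      · rw [show pfwSep (c :: rest) i cs ce true = pfwSep rest (i+1) cs ce true by
          simp [pfwSep, hc]]
        rw [show i + (c :: rest).length = (i+1) + rest.length by simp; omega]
        rw [(ih (i+1) cs ce).2]
        simp [refEnd, hc]

theorem singleton_prefix_iff (c : Char) (t : List Char) : [c] <+: t ↔ t[0]? = some c := by
  cases t with
  | nil => simp
  | cons a t => simp [List.cons_prefix_cons, eq_comm]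

theorem pfwSplit_ne_nil (l : List Char) : pfwSplit l ≠ [] := by
  cases l with
  | nil => simp [pfwSplit]
  | cons c rest =>
    by_cases hc : c = ' '
    · simp [pfwSplit, hc]
    · simp only [pfwSplit, if_neg hc]
      cases pfwSplit rest <;> simp

-- B's token spans coincide with the reference description of A's separator scan.
theorem pfwSpansB_shift (c : Char) (t' : List Char) (ts : List (List Char)) (i : Nat)
    (hd : c ≠ '-') : pfwSpansB ((c :: t') :: ts) i = pfwSpansB (t' :: ts) (i + 1) := by
  have e2 : i + (t'.length + 1) = i + 1 + t'.length := by omega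
  by_cases hm : '-' ∈ t'
  · have hcT : (c :: t').contains '-' = true := by
      simp only [List.contains_eq_mem, decide_eq_true_eq]
      exact List.mem_cons_of_mem _ hm
    have htT : t'.contains '-' = true := by
      simp only [List.contains_eq_mem, decide_eq_true_eq]; exact hm
    have hfi : (c :: t').findIdx (· == '-') = t'.findIdx (· == '-') + 1 := by
      rw [List.findIdx_cons]
      have hb : (c == '-') = false := by simpa using hd
      simp [hb]
    simp only [pfwSpansB, hcT, htT, if_true, hfi, List.length_cons]
    rw [show i + (t'.findIdx (· == '-') + 1) = i + 1 + t'.findIdx (· == '-') from by omega, e2]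
  · have hcF : (c :: t').contains '-' = false := by
      simp only [List.contains_eq_mem, decide_eq_false_iff_not, List.mem_cons, not_or]
      exact ⟨fun h => hd h.symm, hm⟩
    have htF : t'.contains '-' = false := by
      simp only [List.contains_eq_mem, decide_eq_false_iff_not]; exact hm
    simp only [pfwSpansB, hcF, htF, Bool.false_eq_true, if_false, List.length_cons]
    rw [e2]

-- B's token spans coincide with the reference description of A's separator scan.
theorem pfwSpansB_ref (l : List Char) : ∀ (i : Nat),
    refSpans l i = pfwSpansB (pfwSplit l) i
    ∧ (∀ t ts, pfwSplit l = t :: ts → refEnd l i = (i + t.length, pfwSpansB ts (i + t.length + 1))) := by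
  induction l with
  | nil =>
    intro i
    constructor
    · simp [refSpans, pfwSplit, pfwSpansB]
    · intro t ts h
      simp only [pfwSplit] at h
      cases h
      simp [refEnd, pfwSpansB]
  | cons c rest ih =>
    intro i
    by_cases hc : c = ' '
    · subst hc
      constructor
      · rw [show refSpans (' ' :: rest) i = refSpans rest (i+1) by simp [refSpans]]
        rw [show pfwSplit (' ' :: rest) = [] :: pfwSplit rest by simp [pfwSplit]]
        rw [show pfwSpansB ([] :: pfwSplit rest) i = pfwSpansB (pfwSplit rest) (i + 1) by
          simp [pfwSpansB]]
        exact (ih (i+1)).1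
      · intro t ts h
        rw [show pfwSplit (' ' :: rest) = [] :: pfwSplit rest by simp [pfwSplit]] at h
        cases h
        rw [show refEnd (' ' :: rest) i = (i, refSpans rest (i+1)) by simp [refEnd]]
        simp only [List.length_nil, Nat.add_zero]
        rw [(ih (i+1)).1]
      -- c ≠ ' ': the first token of pfwSplit (c :: rest) is c :: (first token of rest)
    · obtain ⟨t', ts', hsplit⟩ : ∃ t' ts', pfwSplit rest = t' :: ts' := by
        cases h : pfwSplit rest with
        | nil => exact absurd h (pfwSplit_ne_nil rest)
        | cons a b => exact ⟨a, b, rfl⟩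
      have hsplitc : pfwSplit (c :: rest) = (c :: t') :: ts' := by
        simp only [pfwSplit, if_neg hc, hsplit]
      constructor
      · by_cases hd : c = '-'
        · subst hd
          rw [show refSpans ('-' :: rest) i
              = (i, (refEnd rest (i+1)).1) :: (refEnd rest (i+1)).2 by simp [refSpans]]
          rw [hsplitc]
          have hcT : ('-' :: t').contains '-' = true := by
            simp [List.contains_eq_mem]
          have hfi : ('-' :: t').findIdx (· == '-') = 0 := by
            simp [List.findIdx_cons]
          simp only [pfwSpansB, hcT, if_true, hfi, Nat.add_zero, List.length_cons]
          rw [(ih (i+1)).2 t' ts' hsplit]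
          rw [show i + (t'.length + 1) = i + 1 + t'.length from by omega]
        · rw [show refSpans (c :: rest) i = refSpans rest (i+1) by simp [refSpans, hd]]
          rw [hsplitc, pfwSpansB_shift c t' ts' i hd, ← hsplit]
          exact (ih (i+1)).1
      · intro t ts h
        rw [hsplitc] at h
        cases h
        rw [show refEnd (c :: rest) i = refEnd rest (i+1) by simp [refEnd, hc]]
        rw [(ih (i+1)).2 t' ts' hsplit]
        simp only [List.length_cons]
        rw [show i + (t'.length + 1) = i + 1 + t'.length from by omega]

-- A's per-row dict (skip-empty loop over enumerate) equals B's comprehension over pfwNamed.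
theorem pfwRow_eq (fields : List String) (line : String) (sp : List (Nat × Nat)) :
    pfwRowA fields line (sp.map Prod.fst) (sp.map Prod.snd) = pfwRowB (pfwNamed fields) line sp := by
  have h1 : ∀ i : Int, PySem.List.pyGetD (sp.map Prod.fst) i 0 = (PySem.List.pyGetD sp i (0, 0)).1 :=
    fun i => PySem.List.pyGetD_map Prod.fst sp i (0, 0)
  have h2 : ∀ i : Int, PySem.List.pyGetD (sp.map Prod.snd) i 0 = (PySem.List.pyGetD sp i (0, 0)).2 :=
    fun i => PySem.List.pyGetD_map Prod.snd sp i (0, 0)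
  unfold pfwRowA pfwRowB pfwNamed
  rw [List.foldl_filter]
  simp only [h1, h2]
  congr 1
  funext item p
  by_cases hp : p.2 = "" <;> simp [hp]

theorem pfwMain_rows (fields : List String) (sp : List (Nat × Nat)) (hsp : sp ≠ []) :
    ∀ (rest : List String) (acc : List (List (String × String))),
    pfwMainA fields rest (sp.map Prod.fst) (sp.map Prod.snd) acc
      = acc ++ (pfwBody rest).map (fun row => (pfwRowB (pfwNamed fields) row sp).items) := by
  intro rest
  induction rest with
  | nil => intro acc; simp [pfwMainA, pfwBody]
  | cons row rest ih =>
    intro acc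
    have hne : sp.map Prod.fst ≠ [] := by simpa using hsp
    by_cases hd : PySem.Chars.startswith row.toList ['-'] = true
    · simp [pfwMainA, pfwBody, hd, hne]
    · rw [show pfwMainA fields (row :: rest) (sp.map Prod.fst) (sp.map Prod.snd) acc
            = pfwMainA fields rest (sp.map Prod.fst) (sp.map Prod.snd)
                (acc ++ [(pfwRowA fields row (sp.map Prod.fst) (sp.map Prod.snd)).items]) by
        simp [pfwMainA, hd, hne]]
      rw [ih, pfwRow_eq]
      simp [pfwBody, hd]

theorem pfwMain_eq (fields : List String) (data : List String) :
    pfwMainA fields data [] [] [] = parse_fixed_width_table_alt fields data := by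
  induction data with
  | nil => simp [pfwMainA, parse_fixed_width_table_alt, pfwFindHeader]
  | cons line rest ih =>
    by_cases hd : PySem.Chars.startswith line.toList ['-'] = true
    · have h0 := (singleton_prefix_iff '-' _).mp ((PySem.Chars.startswith_iff _ _).mp hd)
      obtain ⟨t, ht⟩ : ∃ t, line.toList = '-' :: t := by
        cases hx : line.toList with
        | nil => rw [hx] at h0; cases h0
        | cons a t =>
          rw [hx] at h0
          simp at h0
          exact ⟨t, by rw [h0]⟩
      have hsep := (pfwSep_ref line.toList 0 [] []).1
      rcases hst : pfwSep line.toList 0 [] [] false with ⟨cs', ce', inc⟩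
      rw [hst] at hsep
      have hcs : cs' = (refSpans line.toList 0).map Prod.fst := by
        have h' := congrArg Prod.fst hsep
        simpa [pfwFix] using h'
      have hce : (if inc then ce' ++ [line.toList.length] else ce')
          = (refSpans line.toList 0).map Prod.snd := by
        have h' := congrArg Prod.snd hsep
        simpa [pfwFix] using h'
      have hsp0 : refSpans line.toList 0 ≠ [] := by
        rw [ht]; simp [refSpans]
      rw [show pfwMainA fields (line :: rest) [] [] [] =
            pfwMainA fields rest cs' (if inc then ce' ++ [line.toList.length] else ce') [] by
        simp [pfwMainA, hd, hst]]
      rw [hcs, hce, pfwMain_rows fields _ hsp0 rest []]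
      unfold parse_fixed_width_table_alt
      rw [show pfwFindHeader (line :: rest) = some (line, rest) by simp [pfwFindHeader, hd]]
      show [] ++ (pfwBody rest).map (fun row => (pfwRowB (pfwNamed fields) row (refSpans line.toList 0)).items)
          = (pfwBody rest).map (fun row => (pfwRowB (pfwNamed fields) row (pfwSpansB (pfwSplit line.toList) 0)).items)
      rw [← (pfwSpansB_ref line.toList 0).1]
      simp
    · rw [show pfwMainA fields (line :: rest) [] [] [] = pfwMainA fields rest [] [] [] by
        simp [pfwMainA, hd]]
      rw [ih]
      unfold parse_fixed_width_table_alt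
      rw [show pfwFindHeader (line :: rest) = pfwFindHeader rest by simp [pfwFindHeader, hd]]

-- ===== VERDICT (by name: the statement is the Claim_ definition above) =====
theorem parse_fixed_width_table_spec : Claim_equal_parse_fixed_width_table := by
  intro fields data _ _
  unfold Spec_parse_fixed_width_table parse_fixed_width_table
  exact pfwMain_eq fields data
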